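-- pv_equiv track=rewrite | github.com/frida/frida-gum | bindings/gumjs/generate-bindings.py | generate_umbrella
-- ===== SOURCE A (Python) =====
-- def generate_umbrella(runtime, name, section, flavor_combos):
--     lines = []
--
--     arch_defines = {
--         "x86": "HAVE_I386",
--         "arm": "HAVE_ARM",
--         "arm64": "HAVE_ARM64",
--         "mips": "HAVE_MIPS",
--     }
--
--     current_arch = None
--     for arch, flavor in flavor_combos:
--         if arch != current_arch:
--             if current_arch is not None:
--                 lines.extend([
--                     "#endif",
--                     "",
--                 ])
--             lines.extend([
--                 "#ifdef " + arch_defines[arch],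
--                 "",
--             ])
--             current_arch = arch
--
--         lines.append("# include \"gum{0}code{1}{2}-{3}.inc\"".format(runtime, name, section, flavor))
--
--         if section == "-methods":
--             if flavor == "thumb":
--                 lines.extend(generate_alias_definitions("special", runtime, name, flavor))
--             else:
--                 lines.extend(generate_alias_definitions("default", runtime, name, flavor))
--                 if flavor != "arm":
--                     lines.extend(generate_alias_definitions("special", runtime, name, flavor))
--
--     lines.append("#endif")
--
--     filename = "gum{0}code{1}{2}.inc".format(runtime, name, section)
--     code = "\n".join(lines)
--
--     return (filename, code)
--
-- def generate_alias_definitions(alias, runtime, name, flavor):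
--     alias_function_prefix = "gum_{0}_{1}_{2}".format(runtime, alias, name)
--     wrapper_function_prefix = "gum_{0}_{1}_{2}".format(runtime, flavor, name)
--     impl_function_prefix = "gum_{0}_{1}".format(flavor, name)
--
--     params = {
--         "name_uppercase": name.upper(),
--         "alias_class_name": to_camel_case("{0}_{1}".format(flavor, name), start_high=True),
--         "alias_field_prefix": "{0}_{1}".format(flavor, name),
--         "alias_struct_name": to_camel_case(alias_function_prefix, start_high=True),
--         "alias_function_prefix": alias_function_prefix,
--         "wrapper_macro_prefix": "GUM_{0}_{1}_{2}".format(runtime.upper(), alias.upper(), name.upper()),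
--         "wrapper_struct_name": to_camel_case(wrapper_function_prefix, start_high=True),
--         "wrapper_function_prefix": wrapper_function_prefix,
--         "impl_struct_name": to_camel_case(impl_function_prefix, start_high=True),
--         "persistent_suffix": "_persistent" if runtime == "v8" else ""
--     }
--
--     return """
-- #define {wrapper_macro_prefix}_CLASS_NAME "{alias_class_name}"
-- #define {wrapper_macro_prefix}_FIELD {alias_field_prefix}
--
-- typedef {wrapper_struct_name} {alias_struct_name};
-- typedef {impl_struct_name} {alias_struct_name}Impl;
--
-- #define _{alias_function_prefix}_new{persistent_suffix} _{wrapper_function_prefix}_new{persistent_suffix}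
-- #define _{alias_function_prefix}_release{persistent_suffix} _{wrapper_function_prefix}_release{persistent_suffix}
-- #define _{alias_function_prefix}_init _{wrapper_function_prefix}_init
-- #define _{alias_function_prefix}_finalize _{wrapper_function_prefix}_finalize
-- #define _{alias_function_prefix}_gc_mark _{wrapper_function_prefix}_gc_mark
-- #define _{alias_function_prefix}_reset _{wrapper_function_prefix}_reset
-- """.format(**params).split("\n")
--
-- def to_camel_case(name, start_high):
--     result = ""
--     uppercase_next = start_high
--     for c in name:
--         if c == "_":
--             uppercase_next = True
--         elif uppercase_next:
--             result += c.upper()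
--             uppercase_next = False
--         else:
--             result += c.lower()
--     return result
-- ===== SOURCE B (Python) =====
-- def generate_umbrella(runtime, name, section, flavor_combos):
--     arch_defines = {
--         "x86": "HAVE_I386",
--         "arm": "HAVE_ARM",
--         "arm64": "HAVE_ARM64",
--         "mips": "HAVE_MIPS",
--     }
--
--     def entry_lines(flavor):
--         out = ["# include \"gum{0}code{1}{2}-{3}.inc\"".format(runtime, name, section, flavor)]
--         if section == "-methods":
--             if flavor == "thumb":
--                 out.extend(generate_alias_definitions("special", runtime, name, flavor))
--             else:
--                 out.extend(generate_alias_definitions("default", runtime, name, flavor))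
--                 if flavor != "arm":
--                     out.extend(generate_alias_definitions("special", runtime, name, flavor))
--         return out
--
--     # split into maximal consecutive runs sharing the same arch, build one
--     # "#ifdef" block per run, then join the blocks with "#endif"/"" separators
--     blocks = []
--     i = 0
--     n = len(flavor_combos)
--     while i < n:
--         arch = flavor_combos[i][0]
--         block = ["#ifdef " + arch_defines[arch], ""]
--         j = i
--         while j < n and flavor_combos[j][0] == arch:
--             block.extend(entry_lines(flavor_combos[j][1]))
--             j += 1
--         blocks.append(block)
--         i = j
--
--     lines = []
--     for block in blocks:
--         if lines:
--             lines.extend(["#endif", ""])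
--         lines.extend(block)
--     lines.append("#endif")
--
--     filename = "gum{0}code{1}{2}.inc".format(runtime, name, section)
--     return (filename, "\n".join(lines))
--
-- def generate_alias_definitions(alias, runtime, name, flavor):
--     alias_function_prefix = "gum_{0}_{1}_{2}".format(runtime, alias, name)
--     wrapper_function_prefix = "gum_{0}_{1}_{2}".format(runtime, flavor, name)
--     impl_function_prefix = "gum_{0}_{1}".format(flavor, name)
--
--     params = {
--         "name_uppercase": name.upper(),
--         "alias_class_name": to_camel_case("{0}_{1}".format(flavor, name), start_high=True),
--         "alias_field_prefix": "{0}_{1}".format(flavor, name),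
--         "alias_struct_name": to_camel_case(alias_function_prefix, start_high=True),
--         "alias_function_prefix": alias_function_prefix,
--         "wrapper_macro_prefix": "GUM_{0}_{1}_{2}".format(runtime.upper(), alias.upper(), name.upper()),
--         "wrapper_struct_name": to_camel_case(wrapper_function_prefix, start_high=True),
--         "wrapper_function_prefix": wrapper_function_prefix,
--         "impl_struct_name": to_camel_case(impl_function_prefix, start_high=True),
--         "persistent_suffix": "_persistent" if runtime == "v8" else ""
--     }
--
--     return """
-- #define {wrapper_macro_prefix}_CLASS_NAME "{alias_class_name}"
-- #define {wrapper_macro_prefix}_FIELD {alias_field_prefix}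
--
-- typedef {wrapper_struct_name} {alias_struct_name};
-- typedef {impl_struct_name} {alias_struct_name}Impl;
--
-- #define _{alias_function_prefix}_new{persistent_suffix} _{wrapper_function_prefix}_new{persistent_suffix}
-- #define _{alias_function_prefix}_release{persistent_suffix} _{wrapper_function_prefix}_release{persistent_suffix}
-- #define _{alias_function_prefix}_init _{wrapper_function_prefix}_init
-- #define _{alias_function_prefix}_finalize _{wrapper_function_prefix}_finalize
-- #define _{alias_function_prefix}_gc_mark _{wrapper_function_prefix}_gc_mark
-- #define _{alias_function_prefix}_reset _{wrapper_function_prefix}_reset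
-- """.format(**params).split("\n")
--
-- def to_camel_case(name, start_high):
--     result = ""
--     uppercase_next = start_high
--     for c in name:
--         if c == "_":
--             uppercase_next = True
--         elif uppercase_next:
--             result += c.upper()
--             uppercase_next = False
--         else:
--             result += c.lower()
--     return result
-- ===== Notes on version B (the rewrite author's own statement) =====
-- stated objective: alternative
-- what changed: B replaces A's current_arch state machine (a single loop tracking the previously seen arch and emitting #endif/#ifdef transitions) by an explicit split of flavor_combos into maximal consecutive same-arch runs, building one #ifdef block per run and joining the blocks with #endif/'' separators.
import Mathlib
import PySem

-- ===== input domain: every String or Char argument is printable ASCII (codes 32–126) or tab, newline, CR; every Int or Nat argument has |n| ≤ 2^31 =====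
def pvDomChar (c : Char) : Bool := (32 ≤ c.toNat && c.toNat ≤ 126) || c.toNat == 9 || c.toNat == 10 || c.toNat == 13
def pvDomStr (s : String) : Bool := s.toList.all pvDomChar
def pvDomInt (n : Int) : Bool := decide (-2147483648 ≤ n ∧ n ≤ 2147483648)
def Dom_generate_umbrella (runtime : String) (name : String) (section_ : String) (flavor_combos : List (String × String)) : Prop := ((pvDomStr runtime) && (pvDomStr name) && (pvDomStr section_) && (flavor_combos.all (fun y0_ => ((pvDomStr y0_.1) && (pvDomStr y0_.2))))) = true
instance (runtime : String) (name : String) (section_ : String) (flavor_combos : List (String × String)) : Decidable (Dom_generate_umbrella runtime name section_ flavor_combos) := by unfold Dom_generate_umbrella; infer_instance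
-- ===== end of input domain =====

-- B replaces A's current_arch state machine by an explicit split of flavor_combos into
-- maximal consecutive same-arch runs, building one "#ifdef" block per run and joining the
-- blocks with "#endif"/"" separators (objective: alternative decomposition, same cost).

-- ===== PORT A =====
-- same-module helpers of A (used verbatim by both Pythons, so shared by both ports)

-- to_camel_case: character loop with an uppercase_next flag (c.upper()/c.lower() on one
-- ASCII char = PySem.Chars.upperChar/lowerChar, exact on the domain)
def to_camel_case (nm : String) (startHigh : Bool) : String :=
  (nm.toList.foldl (fun (st : String × Bool) c =>
    if c == '_' then (st.1, true)
    else if st.2 then (st.1 ++ String.singleton (PySem.Chars.upperChar c), false)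
    else (st.1 ++ String.singleton (PySem.Chars.lowerChar c), false)) ("", startHigh)).1

-- the arch_defines dict literal; Python's arch_defines[arch] raises KeyError for any other
-- arch — those inputs are excluded by Pre_generate_umbrella, so the "" default is never read
def pvArchDefines : List (String × String) :=
  [("x86", "HAVE_I386"), ("arm", "HAVE_ARM"), ("arm64", "HAVE_ARM64"), ("mips", "HAVE_MIPS")]

def archDefine (a : String) : String := (pvArchDefines.lookup a).getD ""

-- generate_alias_definitions: the triple-quoted template .split("\n") written out line by
-- line (exact: the template begins and ends with a newline, hence the leading/trailing "")
def generate_alias_definitions (alias_ : String) (runtime : String) (nm : String) (flavor : String) : List String :=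
  let afp := "gum_" ++ runtime ++ "_" ++ alias_ ++ "_" ++ nm
  let wfp := "gum_" ++ runtime ++ "_" ++ flavor ++ "_" ++ nm
  let ifp := "gum_" ++ flavor ++ "_" ++ nm
  let acn := to_camel_case (flavor ++ "_" ++ nm) true
  let asn := to_camel_case afp true
  let wmp := "GUM_" ++ PySem.Str.upper runtime ++ "_" ++ PySem.Str.upper alias_ ++ "_" ++ PySem.Str.upper nm
  let wsn := to_camel_case wfp true
  let isn := to_camel_case ifp true
  let ps := if runtime == "v8" then "_persistent" else ""
  [ "",
    "#define " ++ wmp ++ "_CLASS_NAME \"" ++ acn ++ "\"",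
    "#define " ++ wmp ++ "_FIELD " ++ flavor ++ "_" ++ nm,
    "",
    "typedef " ++ wsn ++ " " ++ asn ++ ";",
    "typedef " ++ isn ++ " " ++ asn ++ "Impl;",
    "",
    "#define _" ++ afp ++ "_new" ++ ps ++ " _" ++ wfp ++ "_new" ++ ps,
    "#define _" ++ afp ++ "_release" ++ ps ++ " _" ++ wfp ++ "_release" ++ ps,
    "#define _" ++ afp ++ "_init _" ++ wfp ++ "_init",
    "#define _" ++ afp ++ "_finalize _" ++ wfp ++ "_finalize",
    "#define _" ++ afp ++ "_gc_mark _" ++ wfp ++ "_gc_mark",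
    "#define _" ++ afp ++ "_reset _" ++ wfp ++ "_reset",
    "" ]

-- the body of A's for-loop, with state (lines, current_arch)
def pvStepA (runtime : String) (name : String) (section_ : String)
    (st : List String × Option String) (p : String × String) : List String × Option String :=
  let arch := p.1
  let flavor := p.2
  let st :=
    if some arch == st.2 then st
    else ((match st.2 with
           | none => st.1
           | some _ => st.1 ++ ["#endif", ""]) ++ ["#ifdef " ++ archDefine arch, ""], some arch)
  let lines := st.1 ++ ["# include \"gum" ++ runtime ++ "code" ++ name ++ section_ ++ "-" ++ flavor ++ ".inc\""]
  let lines :=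
    if section_ == "-methods" then
      if flavor == "thumb" then lines ++ generate_alias_definitions "special" runtime name flavor
      else
        let lines := lines ++ generate_alias_definitions "default" runtime name flavor
        if flavor != "arm" then lines ++ generate_alias_definitions "special" runtime name flavor else lines
    else lines
  (lines, st.2)

def generate_umbrella (runtime : String) (name : String) (section_ : String) (flavor_combos : List (String × String)) : String × String :=
  let st := flavor_combos.foldl (pvStepA runtime name section_) ([], none)
  let lines := st.1 ++ ["#endif"]
  ("gum" ++ runtime ++ "code" ++ name ++ section_ ++ ".inc", PySem.Str.join "\n" lines)

-- ===== PORT B =====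
-- Source B's entry_lines helper: the include line plus the alias-definition lines
def pvEntryLines (runtime : String) (name : String) (section_ : String) (flavor : String) : List String :=
  let out := ["# include \"gum" ++ runtime ++ "code" ++ name ++ section_ ++ "-" ++ flavor ++ ".inc\""]
  if section_ == "-methods" then
    if flavor == "thumb" then out ++ generate_alias_definitions "special" runtime name flavor
    else
      let out := out ++ generate_alias_definitions "default" runtime name flavor
      if flavor != "arm" then out ++ generate_alias_definitions "special" runtime name flavor else out
  else out

-- Source B's inner while loop: consume the run of entries whose arch equals `arch`,
-- returning their entry lines and the unconsumed remainder
def pvRunSplit (runtime : String) (name : String) (section_ : String) (arch : String) :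
    List (String × String) → List String × List (String × String)
  | [] => ([], [])
  | (a, f) :: rest =>
    if a == arch then
      (pvEntryLines runtime name section_ f ++ (pvRunSplit runtime name section_ arch rest).1,
       (pvRunSplit runtime name section_ arch rest).2)
    else ([], (a, f) :: rest)

-- termination measure for pvGroups (the remainder never grows)
theorem pvRunSplit_len (runtime name section_ arch : String) :
    ∀ l : List (String × String), (pvRunSplit runtime name section_ arch l).2.length ≤ l.length := by
  intro l
  induction l with
  | nil => simp [pvRunSplit]
  | cons p rest ih =>
    obtain ⟨a, f⟩ := p
    by_cases h : (a == arch) = true <;> simp [pvRunSplit, h] <;> omega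


-- Source B's outer while loop: one "#ifdef" block per maximal consecutive same-arch run
def pvGroups (runtime : String) (name : String) (section_ : String) :
    List (String × String) → List (List String)
  | [] => []
  | (a, f) :: rest =>
    (("#ifdef " ++ archDefine a) :: "" ::
       pvEntryLines runtime name section_ f ++ (pvRunSplit runtime name section_ a rest).1)
      :: pvGroups runtime name section_ (pvRunSplit runtime name section_ a rest).2
  termination_by l => l.length
  decreasing_by
    exact Nat.lt_succ_of_le (pvRunSplit_len runtime name section_ a rest)

def generate_umbrella_alt (runtime : String) (name : String) (section_ : String) (flavor_combos : List (String × String)) : String × String :=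
  let lines := (pvGroups runtime name section_ flavor_combos).foldl
    (fun acc block => (if acc.isEmpty then acc else acc ++ ["#endif", ""]) ++ block) []
  let lines := lines ++ ["#endif"]
  ("gum" ++ runtime ++ "code" ++ name ++ section_ ++ ".inc", PySem.Str.join "\n" lines)

-- ===== PRECONDITION & SPEC =====
-- Pre_ excludes exactly the inputs on which A raises KeyError: a flavor combo whose arch is
-- not a key of the arch_defines dict (B raises KeyError there too).
def Pre_generate_umbrella (runtime : String) (name : String) (section_ : String) (flavor_combos : List (String × String)) : Prop :=
  ∀ p ∈ flavor_combos, p.1 = "x86" ∨ p.1 = "arm" ∨ p.1 = "arm64" ∨ p.1 = "mips"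
instance (runtime : String) (name : String) (section_ : String) (flavor_combos : List (String × String)) : Decidable (Pre_generate_umbrella runtime name section_ flavor_combos) := by unfold Pre_generate_umbrella; infer_instance

def pvWitness_generate_umbrella : String × String × String × (List (String × String)) :=
  ("qjs", "writer", "-methods", [("x86", "x86"), ("arm", "arm"), ("arm", "thumb"), ("arm64", "arm64")])

def Spec_generate_umbrella (runtime : String) (name : String) (section_ : String) (flavor_combos : List (String × String)) (out : String × String) : Prop := out = generate_umbrella_alt runtime name section_ flavor_combos
instance (runtime : String) (name : String) (section_ : String) (flavor_combos : List (String × String)) (out : String × String) : Decidable (Spec_generate_umbrella runtime name section_ flavor_combos out) := by unfold Spec_generate_umbrella; infer_instance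

-- ===== CLAIM (what is proved, stated in full; the proofs are below) =====
def Claim_equal_generate_umbrella : Prop := ∀ (runtime : String) (name : String) (section_ : String) (flavor_combos : List (String × String)), Dom_generate_umbrella runtime name section_ flavor_combos → Pre_generate_umbrella runtime name section_ flavor_combos → Spec_generate_umbrella runtime name section_ flavor_combos (generate_umbrella runtime name section_ flavor_combos)

-- ===== LEMMAS AND PROOFS =====

-- A's step on a matching arch just appends the entry lines
theorem pvStepA_same (runtime name section_ arch flavor : String) (lines : List String) :
    pvStepA runtime name section_ (lines, some arch) (arch, flavor)
      = (lines ++ pvEntryLines runtime name section_ flavor, some arch) := by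
  simp only [pvStepA, pvEntryLines]
  split_ifs <;> simp_all [List.append_assoc]

-- A's step on a fresh arch closes the open block and opens a new one
theorem pvStepA_new (runtime name section_ arch a flavor : String) (lines : List String)
    (h : a ≠ arch) :
    pvStepA runtime name section_ (lines, some arch) (a, flavor)
      = (lines ++ "#endif" :: "" :: ("#ifdef " ++ archDefine a) :: "" ::
           pvEntryLines runtime name section_ flavor, some a) := by
  simp only [pvStepA, pvEntryLines]
  split_ifs <;> simp_all [List.append_assoc]

-- A's step from the initial state (current_arch = None) opens the first block
theorem pvStepA_none (runtime name section_ a flavor : String) (lines : List String) :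
    pvStepA runtime name section_ (lines, none) (a, flavor)
      = (lines ++ ("#ifdef " ++ archDefine a) :: "" ::
           pvEntryLines runtime name section_ flavor, some a) := by
  simp only [pvStepA, pvEntryLines]
  split_ifs <;> simp_all [List.append_assoc]

-- the heart of the equivalence: from an open block for `arch`, A's remaining loop produces
-- exactly the rest of the current run followed by the remaining groups, each preceded by
-- the "#endif"/"" separator
theorem pvLoop (runtime name section_ : String) :
    ∀ (l : List (String × String)) (acc : List String) (arch : String),
      (l.foldl (pvStepA runtime name section_) (acc, some arch)).1
        = acc ++ (pvRunSplit runtime name section_ arch l).1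
            ++ (pvGroups runtime name section_ (pvRunSplit runtime name section_ arch l).2).flatMap
                 (fun b => "#endif" :: "" :: b) := by
  intro l
  induction l with
  | nil => intro acc arch; simp [pvRunSplit, pvGroups]
  | cons p rest ih =>
    intro acc arch
    obtain ⟨a, f⟩ := p
    by_cases h : a = arch
    · subst h
      simp only [List.foldl_cons, pvStepA_same, pvRunSplit, beq_self_eq_true, if_pos]
      rw [ih]
      simp [List.append_assoc]
    · simp only [List.foldl_cons, pvStepA_new runtime name section_ arch a f acc h,
        pvRunSplit, beq_iff_eq, h, if_neg, not_false_iff]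
      rw [ih]
      rw [pvGroups]
      simp [List.append_assoc]

-- B's join loop: blocks are joined with the "#endif"/"" separator (every block produced by
-- pvGroups is nonempty, so the isEmpty test only fires on the initial accumulator)
theorem pvJoin (bs : List (List String)) :
    ∀ acc : List String, acc ≠ [] →
      (bs.foldl (fun acc block => (if acc.isEmpty then acc else acc ++ ["#endif", ""]) ++ block) acc)
        = acc ++ bs.flatMap (fun b => "#endif" :: "" :: b) := by
  induction bs with
  | nil => intro acc _; simp
  | cons b rest ih =>
    intro acc hacc
    have he : acc.isEmpty = false := by simpa using hacc
    simp only [List.foldl_cons, he, Bool.false_eq_true, if_false]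
    rw [ih (acc ++ ["#endif", ""] ++ b) (by simp)]
    simp [List.append_assoc]

-- ===== VERDICT (by name: the statement is the Claim_ definition above) =====
theorem generate_umbrella_spec : Claim_equal_generate_umbrella := by
  intro runtime name section_ flavor_combos _ _
  unfold Spec_generate_umbrella generate_umbrella generate_umbrella_alt
  cases flavor_combos with
  | nil => simp [pvGroups]
  | cons p rest =>
    obtain ⟨a, f⟩ := p
    simp only [List.foldl_cons, pvStepA_none]
    rw [pvLoop]
    rw [pvGroups]
    rw [List.foldl_cons]
    simp only [List.isEmpty_nil, if_pos, List.nil_append]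
    rw [pvJoin _ _ (by simp)]
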